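-- pv_equiv track=rewrite | github.com/BolinQiu/Host-based-Intrusion-Detection-System | Graph_construction.py | path2higlist
-- ===== SOURCE A (Python) =====
-- def path2higlist(path):
--     '''
--         1. 对文件路径而言，我们取目录的子串进行特征编码，比如：
--         /home/user/file.txt -> ['/home', '/home/user', '/home/user/file.txt']
--         2. 对这些子串分别进行编码[hash(i) for i in substrings]，得到特征向量，作为节点的特征
--
--         该函数为子串提取函数。
--         :param path: file path
--         :return: substrings
--     '''
--     substrings = []
--     elements = path.strip().split('/')
--     for i in elements:
--         if len(substrings) != 0:
--             substrings.append(substrings[-1] + '/' + i)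
--         else:
--             substrings.append(i)
--     return substrings
-- ===== SOURCE B (Python) =====
-- def path2higlist(path):
--     elements = path.strip().split('/')
--     return ['/'.join(elements[:i + 1]) for i in range(len(elements))]
-- ===== Notes on version B (the rewrite author's own statement) =====
-- stated objective: alternative
-- what changed: A extends a running accumulator, building each prefix from the previous one via substrings[-1]; B keeps no running state and recomputes each prefix independently by joining the slice elements[:i+1] of the split list.
import Mathlib
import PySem

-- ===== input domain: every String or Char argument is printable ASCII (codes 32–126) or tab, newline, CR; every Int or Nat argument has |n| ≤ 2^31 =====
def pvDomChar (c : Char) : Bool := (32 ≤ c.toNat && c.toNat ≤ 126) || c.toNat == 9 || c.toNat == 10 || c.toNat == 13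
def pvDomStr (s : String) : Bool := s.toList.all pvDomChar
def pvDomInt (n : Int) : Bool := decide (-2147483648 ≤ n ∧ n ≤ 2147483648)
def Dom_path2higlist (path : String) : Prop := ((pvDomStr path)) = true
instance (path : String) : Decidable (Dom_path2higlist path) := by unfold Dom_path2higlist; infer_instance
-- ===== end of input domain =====

-- B replaces A's incremental accumulator (each prefix extends the previous one) by an
-- independent recompute-from-scratch comprehension: join of the slice elements[:i+1] for each i.

-- ===== PORT A =====
-- step of A's loop body: append last + '/' + i when substrings is nonempty, else append i
def path2higlistStep (substrings : List String) (i : String) : List String :=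
  if substrings.length ≠ 0 then
    substrings ++ [((PySem.List.pyGet? substrings (-1)).getD "") ++ "/" ++ i]
  else
    substrings ++ [i]

def path2higlist (path : String) : List String :=
  ((PySem.Str.split? (PySem.Str.strip path) "/").getD []).foldl path2higlistStep []

-- ===== PORT B =====
def path2higlist_alt (path : String) : List String :=
  let elements := (PySem.Str.split? (PySem.Str.strip path) "/").getD []
  (PySem.List.pyRange 0 elements.length 1).map
    (fun i => PySem.Str.join "/" (PySem.List.slice elements none (some (i + 1))))

-- ===== PRECONDITION & SPEC =====
def Spec_path2higlist (path : String) (out : List String) : Prop := out = path2higlist_alt path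
instance (path : String) (out : List String) : Decidable (Spec_path2higlist path out) := by unfold Spec_path2higlist; infer_instance

-- ===== CLAIM (what is proved, stated in full; the proofs are below) =====
def Claim_equal_path2higlist : Prop := ∀ (path : String), Dom_path2higlist path → Spec_path2higlist path (path2higlist path)

-- ===== LEMMAS AND PROOFS =====

-- the chain of prefixes A's loop builds after its first element, each extending the previous
def pvBuild (p : String) : List String → List String
  | [] => []
  | i :: es => (p ++ "/" ++ i) :: pvBuild (p ++ "/" ++ i) es

theorem pv_foldA (es : List String) : ∀ (a : List String) (p : String),
    (es.foldl path2higlistStep (a ++ [p])) = (a ++ [p]) ++ pvBuild p es := by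
  induction es with
  | nil => intro a p; simp [pvBuild]
  | cons i es ih =>
    intro a p
    have hstep : path2higlistStep (a ++ [p]) i = (a ++ [p]) ++ [p ++ "/" ++ i] := by
      simp [path2higlistStep]
    rw [List.foldl_cons, hstep, ih (a ++ [p]) (p ++ "/" ++ i), pvBuild]
    simp

theorem pv_join_singleton (x : String) : PySem.Str.join "/" [x] = x := by
  apply String.toList_inj.mp
  simp [PySem.Str.toList_join, PySem.Chars.join_singleton]

theorem pv_join_cons (x : String) (xs : List String) (h : xs ≠ []) :
    PySem.Str.join "/" (x :: xs) = x ++ "/" ++ PySem.Str.join "/" xs := by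
  cases xs with
  | nil => exact absurd rfl h
  | cons q rest =>
    apply String.toList_inj.mp
    simp [PySem.Str.toList_join, PySem.Chars.join_cons_cons, String.toList_append]

theorem pv_build_eq (es : List String) : ∀ (p : String),
    pvBuild p es =
      (List.range es.length).map
        (fun k => p ++ "/" ++ PySem.Str.join "/" (es.take (k + 1))) := by
  induction es with
  | nil => intro p; simp [pvBuild]
  | cons i es ih =>
    intro p
    simp only [pvBuild, List.length_cons, List.range_succ_eq_map, List.map_cons, List.map_map]
    congr 1
    · simp [pv_join_singleton]
    · rw [ih (p ++ "/" ++ i)]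
      apply List.map_congr_left
      intro k hk
      have hk' : k < es.length := List.mem_range.mp hk
      have hne : es.take (k + 1) ≠ [] :=
        List.ne_nil_of_length_pos (by simp [List.length_take]; omega)
      simp only [Function.comp, Nat.succ_eq_add_one]
      rw [List.take_succ_cons, pv_join_cons i _ hne]
      simp [String.append_assoc]

theorem pv_main (elements : List String) :
    elements.foldl path2higlistStep [] =
      (List.range elements.length).map
        (fun k => PySem.Str.join "/" (elements.take (k + 1))) := by
  cases elements with
  | nil => simp
  | cons e es =>
    have h0 : path2higlistStep [] e = [] ++ [e] := by simp [path2higlistStep]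
    rw [List.foldl_cons, h0, pv_foldA es [] e, pv_build_eq]
    simp only [List.nil_append, List.singleton_append, List.length_cons, List.range_succ_eq_map,
      List.map_cons, List.map_map]
    congr 1
    · simp [pv_join_singleton]
    · apply List.map_congr_left
      intro k hk
      have hk' : k < es.length := by simpa using hk
      have hne : es.take (k + 1) ≠ [] :=
        List.ne_nil_of_length_pos (by simp [List.length_take]; omega)
      exact (pv_join_cons e _ hne).symm

-- ===== VERDICT (by name: the statement is the Claim_ definition above) =====
theorem path2higlist_spec : Claim_equal_path2higlist := by
  intro path _
  unfold Spec_path2higlist path2higlist path2higlist_alt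
  rw [pv_main]
  simp only [PySem.List.pyRange_zero_nat, List.map_map]
  apply List.map_congr_left
  intro k hk
  simp only [Function.comp]
  have ht : ((k : Int) + 1).toNat = k + 1 := by omega
  rw [PySem.List.slice_to, ht]
  omega
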